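-- pv_equiv track=rewrite | github.com/Lyla-Dev/algorithm-study | EntryLevel/Day9/33_Taehe.py | solution
-- ===== SOURCE A (Python) =====
-- def solution(hp):
--     ants = {
--         "general": 5,
--         "soldier": 3,
--         "work": 1
--     }
--
--     total_ants = 0
--
--     for power in ants.values():
--         total_ants += hp // power
--         hp %= power
--
--     return total_ants
-- ===== SOURCE B (Python) =====
-- def solution(hp):
--     # Residue-table formulation: the answer is linear in the quotient by
--     # the largest ant's power plus a precomputed period-5 lookup table of
--     # the ant count needed for each possible remainder.
--     return hp // 5 + (0, 1, 2, 1, 2)[hp % 5]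
-- ===== Notes on version B (the rewrite author's own statement) =====
-- stated objective: simpler
-- what changed: Replaces the staged greedy divisions (loop over 5,3,1 with a running accumulator and mutated hp) with a single quotient plus a precomputed period-5 residue lookup table; no loop and no chained division by 3 and 1.
import Mathlib
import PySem

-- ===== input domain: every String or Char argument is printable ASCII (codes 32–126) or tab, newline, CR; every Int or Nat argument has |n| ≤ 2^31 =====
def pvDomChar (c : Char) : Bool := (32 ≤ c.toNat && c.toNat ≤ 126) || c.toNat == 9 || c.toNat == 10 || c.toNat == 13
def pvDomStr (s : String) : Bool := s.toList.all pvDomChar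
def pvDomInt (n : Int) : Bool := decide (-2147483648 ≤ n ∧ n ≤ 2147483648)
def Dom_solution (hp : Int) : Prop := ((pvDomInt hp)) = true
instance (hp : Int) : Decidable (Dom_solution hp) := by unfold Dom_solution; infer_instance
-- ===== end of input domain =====

-- B replaces A's staged greedy loop with a quotient-by-5 plus a period-5 residue lookup table (objective: simpler).

-- ===== PORT A =====
-- the dict of ants: insertion-ordered association list; the loop folds over its values
def solution_ants : PySem.Dict String Int :=
  (PySem.Dict.empty.insert "general" 5 |>.insert "soldier" 3 |>.insert "work" 1)

def solution (hp : Int) : Int :=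
  let st := (PySem.Dict.values solution_ants).foldl
    (fun (st : Int × Int) power =>
      (st.1 + PySem.Int.floordiv st.2 power, PySem.Int.mod st.2 power))
    (0, hp)
  st.1

-- ===== PORT B =====
def solution_alt (hp : Int) : Int :=
  PySem.Int.floordiv hp 5
    + (PySem.List.pyGet? ([0, 1, 2, 1, 2] : List Int) (PySem.Int.mod hp 5)).getD 0
    -- the .getD 0 only discharges the Option: hp % 5 ∈ [0,5) so the tuple index never raises

-- ===== PRECONDITION & SPEC =====
def Spec_solution (hp : Int) (out : Int) : Prop := out = solution_alt hp
instance (hp : Int) (out : Int) : Decidable (Spec_solution hp out) := by unfold Spec_solution; infer_instance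

-- ===== CLAIM (what is proved, stated in full; the proofs are below) =====
def Claim_equal_solution : Prop := ∀ (hp : Int), Dom_solution hp → Spec_solution hp (solution hp)

-- ===== LEMMAS AND PROOFS =====
-- the period-5 table agrees with the greedy 3s-then-1s counts on each residue
theorem solution_table (r : Int) (h0 : 0 ≤ r) (h5 : r < 5) :
    PySem.Int.floordiv r 3 + PySem.Int.floordiv (PySem.Int.mod r 3) 1 =
      (PySem.List.pyGet? ([0, 1, 2, 1, 2] : List Int) r).getD 0 := by
  interval_cases r <;> decide

theorem solution_eq_alt (hp : Int) : solution hp = solution_alt hp := by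
  have h0 : 0 ≤ PySem.Int.mod hp 5 := PySem.Int.mod_nonneg hp (by norm_num)
  have h5 : PySem.Int.mod hp 5 < 5 := PySem.Int.mod_lt hp (by norm_num)
  have htab := solution_table (PySem.Int.mod hp 5) h0 h5
  have hv : PySem.Dict.values solution_ants = [5, 3, 1] := by decide
  simp only [solution, solution_alt, hv, List.foldl]
  linarith [htab]

-- ===== VERDICT (by name: the statement is the Claim_ definition above) =====
theorem solution_spec : Claim_equal_solution := by
  intro hp _
  exact solution_eq_alt hp
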